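-- pv_equiv track=rewrite | github.com/RideGreg/LintCode | Python/1470-the-game-of-take-numbers.py | theGameOfTakeNumbers
-- ===== SOURCE A (Python) =====
-- def theGameOfTakeNumbers(arr):
--     n = len(arr)
--     if n % 2 == 0: return 1
--
--     sums = [0]
--     for a in arr:
--         sums.append(sums[-1]+a)
--     dp = [0] * n
--     for i in reversed(range(n)):
--         for j in range(i, n):
--             if j == i:
--                 dp[j] = arr[j]
--             else:
--                 dp[j] = (sums[j+1]-sums[i]) - min(dp[j], dp[j-1])
--     return dp[-1] * 2 >= sums[n]
-- ===== SOURCE B (Python) =====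
-- def theGameOfTakeNumbers(arr):
--     n = len(arr)
--     if n % 2 == 0:
--         return 1
--     # dp[i] holds the score DIFFERENCE (player-to-move minus opponent) of the
--     # end-taking game on arr[i..j]; no sums are needed at all.
--     dp = list(arr)
--     for j in range(1, n):
--         for i in reversed(range(j)):
--             dp[i] = max(arr[i] - dp[i + 1], arr[j] - dp[i])
--     return dp[0] >= 0
-- ===== Notes on version B (the rewrite author's own statement) =====
-- stated objective: alternative
-- what changed: Replaces A's interval DP on first-player totals (interval sum minus min of subgames, needing an explicit prefix-sum array) by the score-difference recurrence dp[i] = max(arr[i]-dp[i+1], arr[j]-dp[i]) with a final nonnegativity test of the whole-array difference, computing no sums at all; Pre_ excludes even-length lists, on which A returns the int 1 rather than a bool.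
-- outside the precondition, e.g. on theGameOfTakeNumbers([]): A returns 1, B returns 1; on theGameOfTakeNumbers([3, 4]): A returns 1, B returns 1
import Mathlib
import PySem

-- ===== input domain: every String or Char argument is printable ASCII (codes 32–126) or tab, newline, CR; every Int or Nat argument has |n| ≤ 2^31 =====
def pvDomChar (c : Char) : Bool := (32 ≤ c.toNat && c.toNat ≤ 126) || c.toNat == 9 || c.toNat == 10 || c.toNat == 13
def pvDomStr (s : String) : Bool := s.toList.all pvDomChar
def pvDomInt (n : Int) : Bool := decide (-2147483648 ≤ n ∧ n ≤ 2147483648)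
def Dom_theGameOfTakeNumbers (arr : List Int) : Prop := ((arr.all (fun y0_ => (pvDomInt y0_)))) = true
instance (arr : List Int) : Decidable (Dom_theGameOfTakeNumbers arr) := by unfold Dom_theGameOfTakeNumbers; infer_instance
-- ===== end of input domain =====

-- B replaces A's sum-minus-min interval DP (with an explicit prefix-sum array) by the
-- score-DIFFERENCE recurrence dp[i] = max(arr[i]-dp[i+1], arr[j]-dp[i]) and tests whether the whole-array difference is nonnegative:
-- no sums are computed at all; alternative algorithm of the same O(n^2) cost.

-- ===== PORT A =====
-- sums = [0]; for a in arr: sums.append(sums[-1]+a)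
def sumsListA (arr : List Int) : List Int :=
  arr.foldl (fun s a => s ++ [PySem.List.pyGetD s (-1) 0 + a]) [(0 : Int)]

-- body of the inner 'for j in range(i, n)' loop of A
def stepA (arr sums : List Int) (i : Int) (dp : List Int) (j : Int) : List Int :=
  if j == i then
    PySem.List.pySetD dp j (PySem.List.pyGetD arr j 0)
  else
    PySem.List.pySetD dp j
      ((PySem.List.pyGetD sums (j + 1) 0 - PySem.List.pyGetD sums i 0)
        - min (PySem.List.pyGetD dp j 0) (PySem.List.pyGetD dp (j - 1) 0))

-- one iteration of the outer 'for i in reversed(range(n))' loop of A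
def rowA (arr sums : List Int) (dp : List Int) (i : Int) : List Int :=
  (PySem.List.pyRange i (arr.length : Int) 1).foldl (stepA arr sums i) dp

def theGameOfTakeNumbers (arr : List Int) : Bool :=
  let n := arr.length
  if n % 2 == 0 then true
  else
    let sums := sumsListA arr
    let dp :=
      ((PySem.List.pyRange 0 (n : Int) 1).reverse).foldl (rowA arr sums)
        (List.replicate n (0 : Int))
    decide (PySem.List.pyGetD dp (-1) 0 * 2 ≥ PySem.List.pyGetD sums (n : Int) 0)

-- ===== PORT B =====
-- body of B's inner 'for i in reversed(range(j))' loop: one in-place difference update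
def colB (arr : List Int) (j : Int) (dp : List Int) (i : Int) : List Int :=
  PySem.List.pySetD dp i
    (max (PySem.List.pyGetD arr i 0 - PySem.List.pyGetD dp (i + 1) 0)
         (PySem.List.pyGetD arr j 0 - PySem.List.pyGetD dp i 0))

def theGameOfTakeNumbers_alt (arr : List Int) : Bool :=
  let n := arr.length
  if n % 2 == 0 then true
  else
    let dp := (PySem.List.pyRange 1 (n : Int) 1).foldl
      (fun dp j => ((PySem.List.pyRange 0 j 1).reverse).foldl (colB arr j) dp) arr
    decide (PySem.List.pyGetD dp 0 0 ≥ 0)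

-- ===== PRECONDITION & SPEC =====
-- Pre_ excludes even-length lists (including []), on which A returns the Python int 1, not a bool.
def Pre_theGameOfTakeNumbers (arr : List Int) : Prop := arr.length % 2 = 1
instance (arr : List Int) : Decidable (Pre_theGameOfTakeNumbers arr) := by unfold Pre_theGameOfTakeNumbers; infer_instance
def pvWitness_theGameOfTakeNumbers : List Int := [5, -2, 9]

def Spec_theGameOfTakeNumbers (arr : List Int) (out : Bool) : Prop := out = theGameOfTakeNumbers_alt arr
instance (arr : List Int) (out : Bool) : Decidable (Spec_theGameOfTakeNumbers arr out) := by unfold Spec_theGameOfTakeNumbers; infer_instance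

-- ===== CLAIM (what is proved, stated in full; the proofs are below) =====
def Claim_equal_theGameOfTakeNumbers : Prop := ∀ (arr : List Int), Dom_theGameOfTakeNumbers arr → Pre_theGameOfTakeNumbers arr → Spec_theGameOfTakeNumbers arr (theGameOfTakeNumbers arr)

-- ===== LEMMAS AND PROOFS =====

-- sum of the interval arr[i..j] (inclusive)
def isum (arr : List Int) (i j : Nat) : Int := ((arr.drop i).take (j + 1 - i)).sum

-- the game value: max the player to move can collect from arr[i..j]
def bst (arr : List Int) (i j : Nat) : Int :=
  if j ≤ i then arr.getD i 0
  else isum arr i j - min (bst arr (i + 1) j) (bst arr i (j - 1))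
termination_by j - i
decreasing_by all_goals omega

-- the score difference: (player to move) minus (opponent) on arr[i..j]
def dff (arr : List Int) (i j : Nat) : Int :=
  if j ≤ i then arr.getD i 0
  else max (arr.getD i 0 - dff arr (i + 1) j) (arr.getD j 0 - dff arr i (j - 1))
termination_by j - i
decreasing_by all_goals omega

-- A's dp after the outer rows n-1 … i have run
def DpA (arr : List Int) (i : Nat) : List Int :=
  (List.range arr.length).map (fun j => if i ≤ j then bst arr i j else 0)

-- A's dp in the middle of row i, inner counter at j
def MixA (arr : List Int) (i j : Nat) : List Int :=
  (List.range arr.length).map (fun k =>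
    if k < j then (if i ≤ k then bst arr i k else 0)
    else (if i + 1 ≤ k then bst arr (i + 1) k else 0))

-- B's dp in the middle of column j, entries j-1 … i still to be updated
def ColB (arr : List Int) (j i : Nat) : List Int :=
  (List.range arr.length).map (fun m =>
    if m < i then dff arr m (j - 1) else dff arr m (max m j))

lemma getD_map_range' (n k : Nat) (f : Nat → Int) :
    ((List.range n).map f).getD k 0 = if k < n then f k else 0 := by
  by_cases h : k < n <;> simp [List.getD_eq_getElem?_getD, h]

lemma map_range_getD (l : List Int) :
    (List.range l.length).map (fun k => l.getD k 0) = l := by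
  apply List.ext_getElem <;> simp [List.getD_eq_getElem?_getD]
  intro i h1 h2; simp [List.getElem?_eq_getElem h2]

lemma set_map_range (n j : Nat) (f : Nat → Int) (v : Int) :
    ((List.range n).map f).set j v
      = (List.range n).map (fun k => if k = j then v else f k) := by
  apply List.ext_getElem
  · simp
  · intro i h1 h2
    simp only [List.getElem_set, List.getElem_map, List.getElem_range]
    by_cases h : i = j <;> simp [h]
    exact fun h' => absurd h'.symm h

lemma sumsListA_aux (l : List Int) (c : Int) (pre : List Int) :
    l.foldl (fun s a => s ++ [PySem.List.pyGetD s (-1) 0 + a]) (pre ++ [c])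
      = pre ++ (List.range (l.length + 1)).map (fun k => c + (l.take k).sum) := by
  induction l generalizing pre c with
  | nil => simp
  | cons a l ih =>
    simp only [List.foldl_cons, PySem.List.pyGetD_neg_one_append_singleton]
    rw [show (pre ++ [c]) ++ [c + a] = (pre ++ [c]) ++ [c + a] from rfl, ih]
    simp only [List.length_cons, List.range_succ_eq_map, List.map_cons, List.map_map]
    simp [List.append_assoc, Function.comp_def, add_assoc]

lemma sumsListA_spec (arr : List Int) :
    sumsListA arr = (List.range (arr.length + 1)).map (fun k => (arr.take k).sum) := by
  have := sumsListA_aux arr 0 []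
  simpa [sumsListA] using this

lemma isum_eq (arr : List Int) (i j : Nat) (h : i ≤ j + 1) :
    isum arr i j = (arr.take (j + 1)).sum - (arr.take i).sum := by
  unfold isum
  have : arr.take (j + 1) = arr.take i ++ (arr.drop i).take (j + 1 - i) := by
    rw [← List.take_add]; congr 1; omega
  rw [this]; simp

lemma sum_take_succ (arr : List Int) (k : Nat) (h : k < arr.length) :
    (arr.take (k + 1)).sum = (arr.take k).sum + arr.getD k 0 := by
  rw [List.take_add_one, List.sum_append]
  simp [List.getElem?_eq_getElem h, List.getD_eq_getElem?_getD]

lemma isum_self (arr : List Int) (i : Nat) (h : i < arr.length) :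
    isum arr i i = arr.getD i 0 := by
  rw [isum_eq arr i i (by omega), sum_take_succ arr i h]; ring

lemma isum_succ (arr : List Int) (i j : Nat) (hij : i ≤ j) (hj : j + 1 < arr.length) :
    isum arr i (j + 1) = isum arr i j + arr.getD (j + 1) 0 := by
  rw [isum_eq arr i (j + 1) (by omega), isum_eq arr i j (by omega),
    sum_take_succ arr (j + 1) hj]
  ring

lemma isum_cons_left (arr : List Int) (i j : Nat) (hij : i < j) (hj : j < arr.length) :
    isum arr i j = arr.getD i 0 + isum arr (i + 1) j := by
  rw [isum_eq arr i j (by omega), isum_eq arr (i + 1) j (by omega),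
    sum_take_succ arr i (by omega)]
  ring

lemma isum_full (arr : List Int) (h : arr ≠ []) :
    isum arr 0 (arr.length - 1) = arr.sum := by
  have hl : 0 < arr.length := List.length_pos_iff.mpr h
  rw [isum_eq arr 0 (arr.length - 1) (by omega)]
  have : arr.length - 1 + 1 = arr.length := by omega
  rw [this]; simp

lemma mixA_lo (arr : List Int) (i : Nat) : MixA arr i i = DpA arr (i + 1) := by
  unfold MixA DpA
  refine List.map_congr_left ?_
  intro k hk
  split_ifs <;> first | rfl | omega

lemma mixA_hi (arr : List Int) (i : Nat) : MixA arr i arr.length = DpA arr i := by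
  unfold MixA DpA
  refine List.map_congr_left ?_
  intro k hk
  simp only [List.mem_range] at hk
  rw [if_pos hk]

lemma dpA_top (arr : List Int) : DpA arr arr.length = List.replicate arr.length 0 := by
  unfold DpA
  apply List.ext_getElem
  · simp
  · intro k h1 h2
    simp only [List.getElem_map, List.getElem_range, List.getElem_replicate]
    rw [if_neg]
    simp at h1
    omega

lemma bst_base (arr : List Int) (i : Nat) : bst arr i i = arr.getD i 0 := by
  rw [bst]; simp

lemma bst_rec (arr : List Int) (i j : Nat) (h : i < j) :
    bst arr i j = isum arr i j - min (bst arr (i + 1) j) (bst arr i (j - 1)) := by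
  rw [bst]; rw [if_neg (by omega)]

lemma dff_base (arr : List Int) (i : Nat) : dff arr i i = arr.getD i 0 := by
  rw [dff]; simp

lemma dff_rec (arr : List Int) (i j : Nat) (h : i < j) :
    dff arr i j = max (arr.getD i 0 - dff arr (i + 1) j) (arr.getD j 0 - dff arr i (j - 1)) := by
  rw [dff]; rw [if_neg (by omega)]

-- the bridge between the two DPs: difference value = 2·(first player's take) − interval sum
lemma dff_eq_bst (arr : List Int) :
    ∀ m i j, j - i = m → i ≤ j → j < arr.length →
      dff arr i j = 2 * bst arr i j - isum arr i j := by
  intro m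
  induction m with
  | zero =>
    intro i j hm hij hj
    obtain rfl : j = i := by omega
    rw [dff_base, bst_base, isum_self arr j hj]
    ring
  | succ m ih =>
    intro i j hm hij hj
    have hlt : i < j := by omega
    rw [dff_rec arr i j hlt, bst_rec arr i j hlt]
    have h1 : dff arr (i + 1) j = 2 * bst arr (i + 1) j - isum arr (i + 1) j :=
      ih (i + 1) j (by omega) (by omega) hj
    have h2 : dff arr i (j - 1) = 2 * bst arr i (j - 1) - isum arr i (j - 1) :=
      ih i (j - 1) (by omega) (by omega) (by omega)
    have h3 : isum arr i j = arr.getD i 0 + isum arr (i + 1) j :=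
      isum_cons_left arr i j hlt hj
    have h4 : isum arr i j = isum arr i (j - 1) + arr.getD j 0 := by
      have := isum_succ arr i (j - 1) (by omega) (by omega)
      have e : j - 1 + 1 = j := by omega
      rw [e] at this
      omega
    rw [h1, h2]
    omega

-- ===== A-side: rolling dp over rows =====

lemma stepA_mix (arr : List Int) (i j : Nat) (hij : i ≤ j) (hj : j < arr.length) :
    stepA arr (sumsListA arr) (i : Int) (MixA arr i j) (j : Int) = MixA arr i (j + 1) := by
  unfold stepA
  by_cases hji : j = i
  · subst hji
    simp only [beq_self_eq_true, if_true, PySem.List.pyGetD_natCast,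
      PySem.List.pySetD_natCast]
    unfold MixA
    rw [set_map_range]
    refine List.map_congr_left ?_
    intro k hk
    by_cases hk1 : k = j
    · subst hk1
      rw [if_pos rfl, if_pos (by omega), if_pos le_rfl, bst_base]
    · rw [if_neg hk1]
      split_ifs <;> first | rfl | omega
  · have hij' : i < j := by omega
    rw [if_neg (by simpa using fun h => hji (by exact_mod_cast h))]
    have hj1 : ((j : Int) + 1) = ((j + 1 : Nat) : Int) := by push_cast; ring
    have hjm : ((j : Int) - 1) = ((j - 1 : Nat) : Int) := by omega
    rw [hj1, hjm]
    simp only [PySem.List.pyGetD_natCast, PySem.List.pySetD_natCast]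
    have hdj : (MixA arr i j).getD j 0 = bst arr (i + 1) j := by
      unfold MixA
      rw [getD_map_range', if_pos hj, if_neg (lt_irrefl j), if_pos (by omega : i + 1 ≤ j)]
    have hdj1 : (MixA arr i j).getD (j - 1) 0 = bst arr i (j - 1) := by
      unfold MixA
      rw [getD_map_range', if_pos (by omega : j - 1 < arr.length),
        if_pos (by omega : j - 1 < j), if_pos (by omega : i ≤ j - 1)]
    have hs1 : (sumsListA arr).getD (j + 1) 0 = (arr.take (j + 1)).sum := by
      rw [sumsListA_spec, getD_map_range', if_pos (by omega)]
    have hs2 : (sumsListA arr).getD i 0 = (arr.take i).sum := by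
      rw [sumsListA_spec, getD_map_range', if_pos (by omega)]
    rw [hdj, hdj1, hs1, hs2]
    have hval : (arr.take (j + 1)).sum - (arr.take i).sum
        - min (bst arr (i + 1) j) (bst arr i (j - 1)) = bst arr i j := by
      rw [← isum_eq arr i j (by omega), ← bst_rec arr i j hij']
    rw [hval]
    unfold MixA
    rw [set_map_range]
    refine List.map_congr_left ?_
    intro k hk
    by_cases hk1 : k = j
    · subst hk1
      rw [if_pos rfl, if_pos (by omega), if_pos (by omega)]
    · rw [if_neg hk1]
      split_ifs <;> first | rfl | omega

lemma rowA_inner (arr : List Int) (i : Nat) (_hi : i < arr.length) :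
    ∀ m j, arr.length - j = m → i ≤ j → j ≤ arr.length →
      (PySem.List.pyRange (j : Int) (arr.length : Int) 1).foldl
        (stepA arr (sumsListA arr) (i : Int)) (MixA arr i j) = MixA arr i arr.length := by
  intro m
  induction m with
  | zero =>
    intro j hm hij hj
    have : j = arr.length := by omega
    subst this
    rw [PySem.List.pyRange_one_eq_nil le_rfl]
    simp
  | succ m ih =>
    intro j hm hij hj
    have hjn : j < arr.length := by omega
    rw [PySem.List.pyRange_one_cons (by exact_mod_cast hjn)]
    rw [List.foldl_cons, stepA_mix arr i j hij hjn]
    have : ((j : Int) + 1) = ((j + 1 : Nat) : Int) := by push_cast; ring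
    rw [this]
    exact ih (j + 1) (by omega) (by omega) (by omega)

lemma rowA_spec (arr : List Int) (i : Nat) (hi : i < arr.length) :
    rowA arr (sumsListA arr) (DpA arr (i + 1)) (i : Int) = DpA arr i := by
  unfold rowA
  rw [← mixA_lo, ← mixA_hi arr i]
  exact rowA_inner arr i hi (arr.length - i) i rfl le_rfl (by omega)

lemma outerA (arr : List Int) :
    ∀ i, i ≤ arr.length →
      ((PySem.List.pyRange 0 (i : Int) 1).reverse).foldl (rowA arr (sumsListA arr)) (DpA arr i)
        = DpA arr 0 := by
  intro i
  induction i with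
  | zero =>
    intro _
    rw [show ((0 : Nat) : Int) = 0 from rfl, PySem.List.pyRange_one_eq_nil le_rfl]
    simp
  | succ i ih =>
    intro h
    have : ((i + 1 : Nat) : Int) = (i : Int) + 1 := by push_cast; ring
    rw [this, PySem.List.pyRange_one_succ_right (by positivity)]
    rw [List.reverse_append]
    simp only [List.reverse_cons, List.reverse_nil, List.nil_append, List.singleton_append,
      List.foldl_cons]
    rw [rowA_spec arr i (by omega)]
    exact ih (by omega)

lemma a_closed (arr : List Int) (hodd : ¬ arr.length % 2 = 0) :
    theGameOfTakeNumbers arr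
      = decide (bst arr 0 (arr.length - 1) * 2 ≥ arr.sum) := by
  have hb : (arr.length % 2 == 0) = false := by simpa using hodd
  have hn1 : 1 ≤ arr.length := by omega
  simp only [theGameOfTakeNumbers, hb, Bool.false_eq_true, if_false]
  rw [← dpA_top arr, outerA arr arr.length le_rfl]
  have hne : DpA arr 0 ≠ [] := by
    unfold DpA
    simp only [ne_eq, List.map_eq_nil_iff, List.range_eq_nil]
    omega
  rw [PySem.List.pyGetD_neg_one _ _ hne]
  have hlast : (DpA arr 0).getLast hne = bst arr 0 (arr.length - 1) := by
    rw [List.getLast_eq_getElem]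
    unfold DpA
    simp
  have hsum : PySem.List.pyGetD (sumsListA arr) ((arr.length : Nat) : Int) 0 = arr.sum := by
    rw [PySem.List.pyGetD_natCast, sumsListA_spec, getD_map_range', if_pos (by omega)]
    simp
  rw [hlast, hsum]

-- ===== B-side: difference dp over columns =====

lemma colB_state (arr : List Int) (j i : Nat) (hij : i < j) (hj : j < arr.length) :
    colB arr (j : Int) (ColB arr j (i + 1)) (i : Int) = ColB arr j i := by
  unfold colB
  have hi1 : ((i : Int) + 1) = ((i + 1 : Nat) : Int) := by push_cast; ring
  rw [hi1]
  simp only [PySem.List.pyGetD_natCast, PySem.List.pySetD_natCast]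
  have hd1 : (ColB arr j (i + 1)).getD (i + 1) 0 = dff arr (i + 1) j := by
    unfold ColB
    rw [getD_map_range', if_pos (by omega : i + 1 < arr.length),
      if_neg (lt_irrefl (i + 1)), max_eq_right (by omega : i + 1 ≤ j)]
  have hd0 : (ColB arr j (i + 1)).getD i 0 = dff arr i (j - 1) := by
    unfold ColB
    rw [getD_map_range', if_pos (by omega : i < arr.length), if_pos (by omega : i < i + 1)]
  rw [hd1, hd0]
  have hval : max (arr.getD i 0 - dff arr (i + 1) j) (arr.getD j 0 - dff arr i (j - 1))
      = dff arr i j := (dff_rec arr i j hij).symm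
  rw [hval]
  unfold ColB
  rw [set_map_range]
  refine List.map_congr_left ?_
  intro k hk
  by_cases hk1 : k = i
  · subst hk1
    rw [if_pos rfl, if_neg (lt_irrefl k), max_eq_right (by omega : k ≤ j)]
  · rw [if_neg hk1]
    split_ifs <;> first | rfl | omega

lemma colB_inner (arr : List Int) (j : Nat) (hj : j < arr.length) :
    ∀ i, i ≤ j →
      ((PySem.List.pyRange 0 (i : Int) 1).reverse).foldl (colB arr (j : Int)) (ColB arr j i)
        = ColB arr j 0 := by
  intro i
  induction i with
  | zero =>
    intro _
    rw [show ((0 : Nat) : Int) = 0 from rfl, PySem.List.pyRange_one_eq_nil le_rfl]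
    simp
  | succ i ih =>
    intro h
    have : ((i + 1 : Nat) : Int) = (i : Int) + 1 := by push_cast; ring
    rw [this, PySem.List.pyRange_one_succ_right (by positivity)]
    rw [List.reverse_append]
    simp only [List.reverse_cons, List.reverse_nil, List.nil_append, List.singleton_append,
      List.foldl_cons]
    rw [colB_state arr j i (by omega) hj]
    exact ih (by omega)

lemma colB_start (arr : List Int) (j : Nat) (hj : 1 ≤ j) :
    ColB arr j j = ColB arr (j - 1) 0 := by
  unfold ColB
  refine List.map_congr_left ?_
  intro m hm
  by_cases h : m < j
  · rw [if_pos h, if_neg (by omega : ¬ m < 0)]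
    congr 1
    omega
  · rw [if_neg h, if_neg (by omega : ¬ m < 0)]
    congr 1
    omega

lemma colB_init (arr : List Int) : ColB arr 0 0 = arr := by
  unfold ColB
  have : ∀ m ∈ List.range arr.length,
      (if m < 0 then dff arr m (0 - 1) else dff arr m (max m 0)) = arr.getD m 0 := by
    intro m hm
    rw [if_neg (by omega), max_eq_left (by omega), dff_base]
  rw [List.map_congr_left this, map_range_getD]

lemma outerB (arr : List Int) :
    ∀ m j, arr.length - j = m → 1 ≤ j → j ≤ arr.length →
      (PySem.List.pyRange (j : Int) (arr.length : Int) 1).foldl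
        (fun dp j => ((PySem.List.pyRange 0 j 1).reverse).foldl (colB arr j) dp)
        (ColB arr (j - 1) 0)
        = ColB arr (arr.length - 1) 0 := by
  intro m
  induction m with
  | zero =>
    intro j hm h1 hj
    have : j = arr.length := by omega
    subst this
    rw [PySem.List.pyRange_one_eq_nil le_rfl]
    simp
  | succ m ih =>
    intro j hm h1 hj
    have hjn : j < arr.length := by omega
    rw [PySem.List.pyRange_one_cons (by exact_mod_cast hjn)]
    rw [List.foldl_cons]
    have hstart : ColB arr (j - 1) 0 = ColB arr j j := (colB_start arr j h1).symm
    rw [hstart, colB_inner arr j hjn j le_rfl]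
    have hc : ((j : Int) + 1) = ((j + 1 : Nat) : Int) := by push_cast; ring
    have he : ColB arr j 0 = ColB arr (j + 1 - 1) 0 := by
      congr 1
    rw [hc, he]
    exact ih (j + 1) (by omega) (by omega) (by omega)

lemma b_closed (arr : List Int) (hodd : ¬ arr.length % 2 = 0) :
    theGameOfTakeNumbers_alt arr
      = decide (bst arr 0 (arr.length - 1) * 2 ≥ arr.sum) := by
  have hb : (arr.length % 2 == 0) = false := by simpa using hodd
  have hn1 : 1 ≤ arr.length := by omega
  have hne : arr ≠ [] := by
    intro h
    rw [h] at hn1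
    simp at hn1
  simp only [theGameOfTakeNumbers_alt, hb, Bool.false_eq_true, if_false]
  have hout := outerB arr (arr.length - 1) 1 rfl le_rfl hn1
  rw [show ColB arr (1 - 1) 0 = arr from colB_init arr] at hout
  simp only [Nat.cast_one] at hout
  rw [hout, PySem.List.pyGetD_zero]
  have hd : (ColB arr (arr.length - 1) 0).getD 0 0 = dff arr 0 (arr.length - 1) := by
    unfold ColB
    rw [getD_map_range', if_pos (by omega : 0 < arr.length), if_neg (lt_irrefl 0),
      max_eq_right (by omega : 0 ≤ arr.length - 1)]
  rw [hd, dff_eq_bst arr (arr.length - 1) 0 (arr.length - 1) rfl (by omega) (by omega),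
    isum_full arr hne]
  exact decide_eq_decide.mpr (by omega)

-- ===== VERDICT (by name: the statement is the Claim_ definition above) =====
theorem theGameOfTakeNumbers_spec : Claim_equal_theGameOfTakeNumbers := by
  intro arr _ hpre
  unfold Spec_theGameOfTakeNumbers
  have h : ¬ arr.length % 2 = 0 := by unfold Pre_theGameOfTakeNumbers at hpre; omega
  rw [a_closed arr h, b_closed arr h]
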